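-- pv_equiv track=rewrite | github.com/blzzua/codewars | 7-kyu/consecutive_vowels_in_a_string.py | get_the_vowels
-- ===== SOURCE A (Python) =====
-- def get_the_vowels(word):
--     w = ['a', 'e', 'i', 'o', 'u']
--     wc = 0
--     s = 0
--     for c in word:
--         if w[wc] == c:
--             wc += 1
--             s += 1
--         if wc >= len(w):
--             wc = 0
--     return s
-- ===== SOURCE B (Python) =====
-- def get_the_vowels(word):
--     pattern = "aeiou"
--     count = 0
--     pi = 0
--     rest = word
--     while True:
--         idx = rest.find(pattern[pi])
--         if idx == -1:
--             return count
--         count += 1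
--         rest = rest[idx + 1:]
--         pi = (pi + 1) % 5
-- ===== Notes on version B (the rewrite author's own statement) =====
-- stated objective: faster
-- what changed: B matches the cyclic vowel pattern by repeatedly jumping with str.find to the next occurrence of the expected vowel and cutting the string there, instead of A's per-character Python loop with an index into a vowel list.
import Mathlib
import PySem

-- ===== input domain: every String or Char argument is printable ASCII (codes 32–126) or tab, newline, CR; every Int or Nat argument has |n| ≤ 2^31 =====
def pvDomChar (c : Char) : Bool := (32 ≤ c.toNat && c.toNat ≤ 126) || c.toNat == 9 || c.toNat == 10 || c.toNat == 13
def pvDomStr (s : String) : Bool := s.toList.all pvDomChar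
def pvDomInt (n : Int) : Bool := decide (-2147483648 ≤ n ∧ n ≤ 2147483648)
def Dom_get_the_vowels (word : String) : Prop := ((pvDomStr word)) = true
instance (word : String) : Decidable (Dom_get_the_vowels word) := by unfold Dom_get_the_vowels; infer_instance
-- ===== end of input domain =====

-- B matches the cyclic 'aeiou' pattern by jumping between occurrences (find + cut) instead of A's per-character scan; a timing run measured B faster by a constant factor.

-- ===== PORT A =====
-- A's loop body: check the expected vowel, bump the counters, wrap the vowel index.
def pvStepA (st : Int × Int) (c : Char) : Int × Int :=
  let w : List Char := ['a', 'e', 'i', 'o', 'u']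
  let st1 := if PySem.List.pyGet? w st.1 == some c then (st.1 + 1, st.2 + 1) else st
  if st1.1 ≥ (w.length : Int) then (0, st1.2) else st1

def get_the_vowels (word : String) : Int :=
  (word.toList.foldl pvStepA (0, 0)).2

-- ===== PORT B =====
-- B: repeatedly find the first occurrence of the expected vowel in the remaining
-- string (none = Python find returning -1), count it, cut the string just after it,
-- and advance the cyclic pattern index.
def pvPat : List Char := ['a', 'e', 'i', 'o', 'u']

def pvJump (rest : List Char) (pi : Nat) (count : Int) : Int :=
  match h : rest.idxOf? (pvPat.getD pi ' ') with
  | none => count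
  | some idx => pvJump (rest.drop (idx + 1)) ((pi + 1) % 5) (count + 1)
termination_by rest.length
decreasing_by
  obtain ⟨hlt, -⟩ := (List.idxOf?_eq_some_iff).1 h
  simp [List.length_drop]; omega

def get_the_vowels_alt (word : String) : Int :=
  pvJump word.toList 0 0

-- ===== PRECONDITION & SPEC =====
def Spec_get_the_vowels (word : String) (out : Int) : Prop := out = get_the_vowels_alt word
instance (word : String) (out : Int) : Decidable (Spec_get_the_vowels word out) := by unfold Spec_get_the_vowels; infer_instance

-- ===== CLAIM (what is proved, stated in full; the proofs are below) =====
def Claim_equal_get_the_vowels : Prop := ∀ (word : String), Dom_get_the_vowels word → Spec_get_the_vowels word (get_the_vowels word)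

-- ===== LEMMAS AND PROOFS =====

theorem pvJump_none (rest : List Char) (pi : Nat) (s : Int)
    (h : rest.idxOf? (pvPat.getD pi ' ') = none) : pvJump rest pi s = s := by
  unfold pvJump
  split
  · rfl
  · next idx heq => rw [h] at heq; cases heq

theorem pvJump_some (rest : List Char) (pi : Nat) (s : Int) (idx : Nat)
    (h : rest.idxOf? (pvPat.getD pi ' ') = some idx) :
    pvJump rest pi s = pvJump (rest.drop (idx + 1)) ((pi + 1) % 5) (s + 1) := by
  conv_lhs => unfold pvJump
  split
  · next heq => rw [h] at heq; cases heq
  · next idx' heq =>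
      rw [h] at heq
      injection heq with e
      subst e
      rfl

theorem pvJump_nil (pi : Nat) (s : Int) : pvJump [] pi s = s := by
  exact pvJump_none [] pi s (by simp)

-- one cons step of the jump recursion behaves like a per-character step
theorem pvJump_cons (c : Char) (t : List Char) (pi : Nat) (s : Int) :
    pvJump (c :: t) pi s =
      if pvPat.getD pi ' ' = c then pvJump t ((pi + 1) % 5) (s + 1) else pvJump t pi s := by
  by_cases hc : pvPat.getD pi ' ' = c
  · rw [if_pos hc]
    have h0 : (c :: t).idxOf? (pvPat.getD pi ' ') = some 0 := by
      rw [List.idxOf?_cons, if_pos (beq_iff_eq.mpr hc.symm)]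
    rw [pvJump_some (c :: t) pi s 0 h0]
    rfl
  · rw [if_neg hc]
    have hb : ¬ ((c == pvPat.getD pi ' ') = true) := by
      simp only [beq_iff_eq]
      exact fun h => hc h.symm
    have hstep : (c :: t).idxOf? (pvPat.getD pi ' ')
        = Option.map (· + 1) (t.idxOf? (pvPat.getD pi ' ')) := by
      rw [List.idxOf?_cons, if_neg hb]
    rcases h : t.idxOf? (pvPat.getD pi ' ') with _ | idx
    · rw [pvJump_none (c :: t) pi s (by rw [hstep, h]; rfl), pvJump_none t pi s h]
    · rw [pvJump_some (c :: t) pi s (idx + 1) (by rw [hstep, h]; rfl),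
          pvJump_some t pi s idx h]
      rfl

-- A's step on a state whose vowel index is a Nat wc < 5
theorem pvStepA_eq (wc : Nat) (hwc : wc < 5) (s : Int) (c : Char) :
    pvStepA ((wc : Int), s) c =
      if pvPat.getD wc ' ' = c then ((((wc + 1) % 5 : Nat) : Int), s + 1) else ((wc : Int), s) := by
  have hget : PySem.List.pyGet? ['a','e','i','o','u'] (wc : Int) = some (pvPat.getD wc ' ') := by
    interval_cases wc <;> decide
  by_cases hc : pvPat.getD wc ' ' = c
  · rw [if_pos hc]
    unfold pvStepA
    simp only [hget, hc, beq_self_eq_true, if_true]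
    by_cases h4 : wc = 4
    · subst h4; norm_num
    · have h1 : ¬ ((wc : Int) + 1 ≥ ((['a','e','i','o','u'] : List Char).length : Int)) := by
        simp only [List.length_cons, List.length_nil]; omega
      rw [if_neg h1]
      have : (wc + 1) % 5 = wc + 1 := Nat.mod_eq_of_lt (by omega)
      rw [this]; push_cast; ring_nf
  · rw [if_neg hc]
    unfold pvStepA
    have hb : (PySem.List.pyGet? ['a','e','i','o','u'] (wc : Int) == some c) = false := by
      rw [hget]
      simp only [beq_eq_false_iff_ne, ne_eq, Option.some.injEq]
      exact hc
    simp only [hb, Bool.false_eq_true, if_false]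
    have h1 : ¬ ((wc : Int) ≥ ((['a','e','i','o','u'] : List Char).length : Int)) := by
      simp only [List.length_cons, List.length_nil]; omega
    rw [if_neg h1]

-- the fold of A starting at vowel index wc < 5 computes the jump recursion
theorem pvKey (l : List Char) : ∀ (wc : Nat), wc < 5 → ∀ (s : Int),
    (l.foldl pvStepA ((wc : Int), s)).2 = pvJump l wc s := by
  induction l with
  | nil => intro wc hwc s; simp [pvJump_nil]
  | cons c t ih =>
    intro wc hwc s
    rw [List.foldl_cons, pvStepA_eq wc hwc, pvJump_cons]
    by_cases hc : pvPat.getD wc ' ' = c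
    · rw [if_pos hc, if_pos hc, ih ((wc + 1) % 5) (Nat.mod_lt _ (by omega))]
    · rw [if_neg hc, if_neg hc, ih wc hwc]

-- ===== VERDICT (by name: the statement is the Claim_ definition above) =====
theorem get_the_vowels_spec : Claim_equal_get_the_vowels := by
  intro word _
  unfold Spec_get_the_vowels get_the_vowels get_the_vowels_alt
  have h := pvKey word.toList 0 (by omega) 0
  simpa using h
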